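-- pv_equiv track=rewrite | github.com/peshev/picoctf2022 | Cryptography/substitution1/solution.py | group_word_frequencies_by_length
-- ===== SOURCE A (Python) =====
-- def group_word_frequencies_by_length(word_frequencies):
--     by_length = {}
--     for w, f in word_frequencies.items():
--         by_length.setdefault(len(w), {})[w] = f
--
--     return {
--         k: sorted(v.items(), key=lambda x: x[1], reverse=True)
--         for k, v in
--         by_length.items()
--     }
-- ===== SOURCE B (Python) =====
-- def group_word_frequencies_by_length(word_frequencies):
--     # One global stable sort by frequency (descending), then a single
--     # bucketing pass; key order of the result follows the original dict.
--     ranked = sorted(word_frequencies.items(), key=lambda x: x[1], reverse=True)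
--     buckets = {}
--     for w, f in ranked:
--         buckets.setdefault(len(w), []).append((w, f))
--     return {len(w): buckets[len(w)] for w in word_frequencies}
-- ===== Notes on version B (the rewrite author's own statement) =====
-- stated objective: alternative
-- what changed: A first groups words into per-length sub-dicts and then sorts each bucket separately; B performs one global stable sort of all items by frequency descending and then distributes them into length buckets in a single pass, relying on sort stability to reproduce A's per-bucket tie order.
import Mathlib
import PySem

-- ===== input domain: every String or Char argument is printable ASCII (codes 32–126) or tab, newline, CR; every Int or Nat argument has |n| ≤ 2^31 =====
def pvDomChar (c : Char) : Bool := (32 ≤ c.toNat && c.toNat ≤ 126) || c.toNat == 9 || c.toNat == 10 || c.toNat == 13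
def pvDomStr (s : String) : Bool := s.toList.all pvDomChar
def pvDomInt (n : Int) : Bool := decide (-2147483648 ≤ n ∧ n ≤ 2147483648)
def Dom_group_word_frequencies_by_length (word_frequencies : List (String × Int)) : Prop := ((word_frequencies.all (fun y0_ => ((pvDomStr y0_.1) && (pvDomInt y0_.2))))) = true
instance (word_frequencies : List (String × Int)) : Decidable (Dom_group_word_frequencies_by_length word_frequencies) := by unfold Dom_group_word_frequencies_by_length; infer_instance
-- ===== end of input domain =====

-- B replaces A's group-then-sort-each-bucket by one global stable sort followed by a single
-- bucketing pass (alternative decomposition, same asymptotic cost); return values agree exactly.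

-- ===== PORT A =====
-- 'by_length.setdefault(len(w), {})[w] = f' is Dict.modify (len w) empty (·.insert w f):
-- absent key appends {} then sets w, present key updates the inner dict in place — exact.
def group_word_frequencies_by_length (word_frequencies : List (String × Int)) : List (Int × List (String × Int)) :=
  let by_length : PySem.Dict Int (PySem.Dict String Int) :=
    (PySem.Dict.ofList word_frequencies).items.foldl
      (fun d p => d.modify ((p.1.length : Int)) PySem.Dict.empty (fun inner => inner.insert p.1 p.2))
      PySem.Dict.empty
  by_length.items.map (fun kv => (kv.1, PySem.List.sorted kv.2.items (fun x => x.2) true))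

-- ===== PORT B =====
-- 'buckets.setdefault(len(w), []).append((w, f))' is Dict.modify (len w) [] (· ++ [(w, f)]).
-- 'buckets[len(w)]' in the final comprehension is Dict.getD (len w) []; the key is always
-- present there (every word was bucketed), so getD is exact — the default is never used.
def group_word_frequencies_by_length_alt (word_frequencies : List (String × Int)) : List (Int × List (String × Int)) :=
  let items := (PySem.Dict.ofList word_frequencies).items
  let ranked := PySem.List.sorted items (fun x => x.2) true
  let buckets : PySem.Dict Int (List (String × Int)) :=
    ranked.foldl (fun d p => d.modify ((p.1.length : Int)) [] (fun l => l ++ [p])) PySem.Dict.empty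
  (items.foldl (fun d p => d.insert ((p.1.length : Int)) (buckets.getD ((p.1.length : Int)) []))
      PySem.Dict.empty).items

-- ===== PRECONDITION & SPEC =====
def Spec_group_word_frequencies_by_length (word_frequencies : List (String × Int)) (out : List (Int × List (String × Int))) : Prop := out = group_word_frequencies_by_length_alt word_frequencies
instance (word_frequencies : List (String × Int)) (out : List (Int × List (String × Int))) : Decidable (Spec_group_word_frequencies_by_length word_frequencies out) := by unfold Spec_group_word_frequencies_by_length; infer_instance

-- ===== CLAIM (what is proved, stated in full; the proofs are below) =====
def Claim_equal_group_word_frequencies_by_length : Prop := ∀ (word_frequencies : List (String × Int)), Dom_group_word_frequencies_by_length word_frequencies → Spec_group_word_frequencies_by_length word_frequencies (group_word_frequencies_by_length word_frequencies)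

-- ===== LEMMAS AND PROOFS =====

theorem pv_insertBy_front {α : Type} (bef : α → α → Bool) (x : α) (ys : List α)
    (h : ∀ z ∈ ys, bef x z = true) :
    PySem.List.insertBy bef x ys = x :: ys := by
  cases ys with
  | nil => rfl
  | cons y t => simp [PySem.List.insertBy, h y (by simp)]

theorem pv_pairwise_insertBy {α : Type} (key : α → Int) (x : α) (ys : List α)
    (h : ys.Pairwise (fun a b => key b ≤ key a)) :
    (PySem.List.insertBy (fun a b => decide (key b < key a)) x ys).Pairwise
      (fun a b => key b ≤ key a) := by
  induction ys with
  | nil => simp [PySem.List.insertBy]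
  | cons y t ih =>
    rcases List.pairwise_cons.mp h with ⟨hy, ht⟩
    by_cases hxy : key y < key x
    · simp only [PySem.List.insertBy, hxy, decide_true]
      refine List.pairwise_cons.mpr ⟨?_, h⟩
      intro z hz
      rcases List.mem_cons.mp hz with rfl | hz
      · omega
      · have := hy z hz; omega
    · simp only [PySem.List.insertBy, hxy, decide_false, Bool.false_eq_true, if_false]
      refine List.pairwise_cons.mpr ⟨?_, ih ht⟩
      intro z hz
      rcases (PySem.List.mem_insertBy _ _ _ _).mp hz with hz | hz
      · subst hz; omega
      · exact hy z hz

theorem pv_filter_insertBy {α : Type} (key : α → Int) (p : α → Bool) (x : α) (ys : List α)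
    (h : ys.Pairwise (fun a b => key b ≤ key a)) :
    (PySem.List.insertBy (fun a b => decide (key b < key a)) x ys).filter p =
      if p x then PySem.List.insertBy (fun a b => decide (key b < key a)) x (ys.filter p)
      else ys.filter p := by
  induction ys with
  | nil => cases hpx : p x <;> simp [PySem.List.insertBy, hpx]
  | cons y t ih =>
    rcases List.pairwise_cons.mp h with ⟨hy, ht⟩
    by_cases hxy : key y < key x
    · simp only [PySem.List.insertBy, hxy, decide_true]
      cases hpx : p x <;> cases hpy : p y
      · simp [List.filter, hpx, hpy]
      · simp [List.filter, hpx, hpy]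
      · -- p x, ¬ p y : x goes to the front of (filter t) since every kept z has key z < key x
        have : PySem.List.insertBy (fun a b => decide (key b < key a)) x (t.filter p) =
            x :: t.filter p := by
          refine pv_insertBy_front _ _ _ ?_
          intro z hz
          have hzy := hy z (List.mem_of_mem_filter hz)
          simp only [decide_eq_true_eq]; omega
        simp [List.filter, hpx, hpy, this]
      · simp [List.filter, hpx, hpy, PySem.List.insertBy, hxy]
    · simp only [PySem.List.insertBy, hxy, decide_false, Bool.false_eq_true, if_false]
      cases hpx : p x <;> cases hpy : p y
      · have := ih ht; simp [List.filter, hpx, hpy, this]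
      · have := ih ht; simp [List.filter, hpx, hpy, this]
      · have := ih ht; simp [List.filter, hpx, hpy, this]
      · have := ih ht
        simp [List.filter, hpx, hpy, this, PySem.List.insertBy, hxy]

theorem pv_filter_foldl {α : Type} (key : α → Int) (p : α → Bool) (xs : List α) :
    ∀ acc : List α, acc.Pairwise (fun a b => key b ≤ key a) →
    (xs.foldl (fun a x => PySem.List.insertBy (fun a b => decide (key b < key a)) x a) acc).filter p
      = (xs.filter p).foldl
          (fun a x => PySem.List.insertBy (fun a b => decide (key b < key a)) x a)
          (acc.filter p) := by
  induction xs with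
  | nil => intro acc _; simp
  | cons x t ih =>
    intro acc hacc
    have hstep := pv_filter_insertBy key p x acc hacc
    have hpw := pv_pairwise_insertBy key x acc hacc
    cases hpx : p x
    · simp only [List.foldl_cons, List.filter_cons, hpx, Bool.false_eq_true, if_false]
      rw [ih _ hpw, hstep, if_neg (by simp [hpx])]
    · simp only [List.foldl_cons, List.filter_cons, hpx, if_pos]
      rw [ih _ hpw, hstep, if_pos hpx]

-- stable reverse sort commutes with filter
theorem pv_sorted_filter {α : Type} (key : α → Int) (p : α → Bool) (xs : List α) :
    (PySem.List.sorted xs key true).filter p = PySem.List.sorted (xs.filter p) key true := by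
  rw [PySem.List.sorted_rev_eq_foldl_insertBy, PySem.List.sorted_rev_eq_foldl_insertBy]
  simpa using pv_filter_foldl key p xs [] (by simp)

-- A's grouping loop, looked up at one length c, is an insert loop over the filtered list
theorem pv_groupA_getD (c : Int) (L : List (String × Int)) :
    ∀ d : PySem.Dict Int (PySem.Dict String Int),
    (L.foldl (fun d p => d.modify ((p.1.length : Int)) PySem.Dict.empty
        (fun inner => inner.insert p.1 p.2)) d).getD c PySem.Dict.empty
      = (L.filter (fun p => (p.1.length : Int) == c)).foldl
          (fun inner p => inner.insert p.1 p.2) (d.getD c PySem.Dict.empty) := by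
  induction L with
  | nil => intro d; simp
  | cons q t ih =>
    intro d
    simp only [List.foldl_cons, List.filter_cons]
    rw [ih]
    by_cases hc : (q.1.length : Int) = c
    · simp [hc]
    · rw [if_neg (by simp [hc]), PySem.Dict.getD_modify, if_neg (fun h => hc h.symm)]

-- B's bucketing loop, looked up at one length c, appends the filtered list
theorem pv_groupB_getD (c : Int) (L : List (String × Int)) :
    ∀ d : PySem.Dict Int (List (String × Int)),
    (L.foldl (fun d p => d.modify ((p.1.length : Int)) [] (fun l => l ++ [p])) d).getD c []
      = d.getD c [] ++ L.filter (fun p => (p.1.length : Int) == c) := by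
  induction L with
  | nil => intro d; simp
  | cons q t ih =>
    intro d
    simp only [List.foldl_cons, List.filter_cons]
    rw [ih]
    by_cases hc : (q.1.length : Int) = c
    · simp [hc]
    · rw [PySem.Dict.getD_modify, if_neg (fun h => hc h.symm), if_neg (by simp [hc])]

-- B's final comprehension loop: value depends only on the key
theorem pv_final_getD (g : Int → List (String × Int)) (c : Int) (L : List (String × Int)) :
    ∀ d : PySem.Dict Int (List (String × Int)),
    (L.foldl (fun d p => d.insert ((p.1.length : Int)) (g ((p.1.length : Int)))) d).getD c []
      = if L.any (fun p => (p.1.length : Int) == c) then g c else d.getD c [] := by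
  induction L with
  | nil => intro d; simp
  | cons q t ih =>
    intro d
    simp only [List.foldl_cons, List.any_cons]
    rw [ih]
    by_cases hc : (q.1.length : Int) = c
    · by_cases ht : t.any (fun p => (p.1.length : Int) == c) = true
      · simp [hc, ht]
      · simp [hc, ht]
    · by_cases ht : t.any (fun p => (p.1.length : Int) == c) = true
      · simp [ht]
      · have hC : ¬(((q.1.length : Int) == c) || t.any (fun p => (p.1.length : Int) == c)) = true := by
          simp only [Bool.or_eq_true, beq_iff_eq, not_or]
          exact ⟨hc, ht⟩
        rw [if_neg hC, if_neg ht, PySem.Dict.getD_insert, if_neg (fun h => hc h.symm)]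

-- ===== VERDICT (by name: the statement is the Claim_ definition above) =====
theorem group_word_frequencies_by_length_spec : Claim_equal_group_word_frequencies_by_length := by
  intro wf _
  unfold Spec_group_word_frequencies_by_length group_word_frequencies_by_length
    group_word_frequencies_by_length_alt
  dsimp only
  set L := (PySem.Dict.ofList wf).items with hLdef
  have hnodupL : (L.map Prod.fst).Nodup := PySem.Dict.nodup_keys_ofList wf
  set dA := L.foldl (fun d p => d.modify ((p.1.length : Int)) PySem.Dict.empty
      (fun inner => inner.insert p.1 p.2)) PySem.Dict.empty with hdA
  set S := PySem.List.sorted L (fun x => x.2) true with hS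
  set buckets := S.foldl (fun d p => d.modify ((p.1.length : Int)) [] (fun l => l ++ [p]))
      PySem.Dict.empty with hB
  set dB := L.foldl (fun d p => d.insert ((p.1.length : Int))
      (buckets.getD ((p.1.length : Int)) [])) PySem.Dict.empty with hdB
  -- the two result dicts carry the same key list
  have hkeysA : dA.keys = PySem.Set.ofList (L.map (fun p => ((p.1.length : Int)))) := by
    rw [hdA, PySem.Dict.keys_foldl_modify_key L (fun p => ((p.1.length : Int)))
      PySem.Dict.empty (fun _ p inner => inner.insert p.1 p.2) PySem.Dict.empty]
    simp [PySem.Set.update, PySem.Set.ofList]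
  have hkeysB : dB.keys = PySem.Set.ofList (L.map (fun p => ((p.1.length : Int)))) := by
    rw [hdB, PySem.Dict.keys_foldl_insert_key L (fun p => ((p.1.length : Int)))
      (fun _ p => buckets.getD ((p.1.length : Int)) []) PySem.Dict.empty]
    simp [PySem.Set.update, PySem.Set.ofList]
  have hnodA : dA.keys.Nodup := by
    rw [hkeysA]; exact PySem.Set.nodup_ofList _
  have hnodB : dB.keys.Nodup := by
    rw [hkeysB]; exact PySem.Set.nodup_ofList _
  rw [PySem.Dict.items_eq_map_keys dA hnodA PySem.Dict.empty,
      PySem.Dict.items_eq_map_keys dB hnodB [], hkeysA, hkeysB, List.map_map]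
  refine List.map_congr_left ?_
  intro c hc
  simp only [Function.comp]
  -- the value A stores at length c
  have hAc : dA.getD c PySem.Dict.empty =
      (L.filter (fun p => ((p.1.length : Int)) == c)).foldl
        (fun inner p => inner.insert p.1 p.2) PySem.Dict.empty := by
    rw [hdA, pv_groupA_getD]; simp
  have hfilter_nodup : ((L.filter (fun p => ((p.1.length : Int)) == c)).map Prod.fst).Nodup :=
    hnodupL.sublist (List.Sublist.map Prod.fst List.filter_sublist)
  have hAitems : (dA.getD c PySem.Dict.empty).items =
      L.filter (fun p => ((p.1.length : Int)) == c) := by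
    rw [hAc, PySem.Dict.items_foldl_insert_fresh _ Prod.fst Prod.snd PySem.Dict.empty
      (fun a _ => PySem.Dict.contains_empty _) hfilter_nodup]
    simp [PySem.Dict.empty]
  -- the value B stores at length c
  have hBc : buckets.getD c [] = S.filter (fun p => ((p.1.length : Int)) == c) := by
    rw [hB, pv_groupB_getD]; simp
  have hmem : L.any (fun p => ((p.1.length : Int)) == c) = true := by
    have : c ∈ L.map (fun p => ((p.1.length : Int))) :=
      (PySem.Set.mem_ofList _ _).mp hc
    rcases List.mem_map.mp this with ⟨p, hp, hpc⟩
    exact List.any_eq_true.mpr ⟨p, hp, by simp [hpc]⟩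
  have hBv : dB.getD c [] = S.filter (fun p => ((p.1.length : Int)) == c) := by
    rw [hdB, pv_final_getD (fun c => buckets.getD c []) c L, if_pos hmem, hBc]
  -- stable sort commutes with the length filter
  have hcomm : S.filter (fun p => ((p.1.length : Int)) == c) =
      PySem.List.sorted (L.filter (fun p => ((p.1.length : Int)) == c)) (fun x => x.2) true := by
    rw [hS]; exact pv_sorted_filter (fun x => x.2) _ L
  rw [hBv, hcomm, hAitems]
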